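/- GENERATED by farm/mkstatement.py from design/units.split.tsv — do not edit.
   THE SPLIT of the proof unit `vorbis_decode_packet_rest.1` into `vorbis_decode_packet_rest.1a`, `vorbis_decode_packet_rest.1b`: the children's statements give the parent's
   UNCHANGED statement (so nothing above the parent — callers, compositions — is touched by the split). -/
import Vorbis.Spec.PacketRest1
import Vorbis.Spec.Units.vorbis_decode_packet_rest_1
import Vorbis.Spec.Units.vorbis_decode_packet_rest_1a
import Vorbis.Spec.Units.vorbis_decode_packet_rest_1b
namespace Vorbis.Spec.Splits
open X86 X86.User Asan

/-- The children of the split unit `vorbis_decode_packet_rest.1` prove it, by `Vorbis.Spec.vorbis_decode_packet_rest.Seg1.of_parts`. -/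
theorem vorbis_decode_packet_rest_1
    (h_vorbis_decode_packet_rest_1a : Vorbis.Spec.vorbis_decode_packet_rest_1a.Statement)
    (h_vorbis_decode_packet_rest_1b : Vorbis.Spec.vorbis_decode_packet_rest_1b.Statement) :
    Vorbis.Spec.vorbis_decode_packet_rest_1.Statement := by
  intro Lay _hLay μ _hμ u₀ _hcode _h_asan_load1_noabort _h_asan_load4_noabort _h_asan_load8_noabort
  apply Vorbis.Spec.vorbis_decode_packet_rest.Seg1.of_parts
  · exact h_vorbis_decode_packet_rest_1a Lay _hLay μ _hμ u₀ _hcode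
  · exact h_vorbis_decode_packet_rest_1b Lay _hLay μ _hμ u₀ _hcode _h_asan_load1_noabort _h_asan_load4_noabort _h_asan_load8_noabort

end Vorbis.Spec.Splits
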